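-- pv_equiv track=rewrite | github.com/PATH242/Accompaniment-Generation | main.py | isChordSus
-- ===== SOURCE A (Python) =====
-- def isChordSus(ch):
--     temp = ["Csus2", "C#sus2", "Dsus2", "Ebsus2", "Esus2", "Fsus2", "F#sus2",
--     "Gsus2", "Absus2", "Asus2", "Bbsus2", "Bsus2", "Csus4", "C#sus4", "Dsus4", "Ebsus4",
--     "Esus4", "Fsus4", "F#sus4", "Gsus4", "Absus4", "Asus4", "Bbsus4", "Bsus4"]
--     for x in temp:
--         if ch == x:
--             return 1
--     return 0
-- ===== SOURCE B (Python) =====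
-- ROOTS = ("C", "C#", "D", "Eb", "E", "F", "F#", "G", "Ab", "A", "Bb", "B")
--
-- def isChordSus(ch):
--     n = len(ch)
--     k = max(n - 4, 0)
--     if ch[k:] in ("sus2", "sus4") and ch[:k] in ROOTS:
--         return 1
--     return 0
-- ===== Notes on version B (the rewrite author's own statement) =====
-- stated objective: idiomatic
-- what changed: B parses the chord name structurally (split into root prefix and a 'sus2'/'sus4' suffix, then check the root against the 12-note set) instead of scanning A's 24-entry whitelist for a whole-string match.
import Mathlib
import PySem

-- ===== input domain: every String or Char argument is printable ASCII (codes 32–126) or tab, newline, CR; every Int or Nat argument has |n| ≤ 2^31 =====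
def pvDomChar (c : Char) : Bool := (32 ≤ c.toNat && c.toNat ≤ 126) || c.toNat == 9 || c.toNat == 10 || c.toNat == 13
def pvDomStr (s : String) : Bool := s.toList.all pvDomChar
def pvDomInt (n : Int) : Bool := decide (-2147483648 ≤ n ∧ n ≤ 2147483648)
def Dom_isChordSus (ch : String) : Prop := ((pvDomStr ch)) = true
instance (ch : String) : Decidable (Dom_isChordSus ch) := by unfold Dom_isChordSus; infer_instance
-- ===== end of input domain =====

-- B parses the chord name (root prefix + 'sus2'/'sus4' suffix) instead of A's 24-name whitelist scan; objective: idiomatic.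

-- ===== PORT A =====
def pvTemp : List String := ["Csus2", "C#sus2", "Dsus2", "Ebsus2", "Esus2", "Fsus2", "F#sus2",
  "Gsus2", "Absus2", "Asus2", "Bbsus2", "Bsus2", "Csus4", "C#sus4", "Dsus4", "Ebsus4",
  "Esus4", "Fsus4", "F#sus4", "Gsus4", "Absus4", "Asus4", "Bbsus4", "Bsus4"]

-- the 'for x in temp: if ch == x: return 1' loop with its early return
def isChordSusGo (ch : String) : List String → Int
  | [] => 0
  | x :: xs => if ch = x then 1 else isChordSusGo ch xs

def isChordSus (ch : String) : Int := isChordSusGo ch pvTemp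

-- ===== PORT B =====
def pvRoots : List String := ["C", "C#", "D", "Eb", "E", "F", "F#", "G", "Ab", "A", "Bb", "B"]

def isChordSus_alt (ch : String) : Int :=
  let l := ch.toList
  let k := l.length - 4          -- = max(len(ch) - 4, 0), Nat subtraction clamps like Python's max
  let suffix := String.ofList (l.drop k)   -- ch[k:]
  let root := String.ofList (l.take k)     -- ch[:k]
  if (suffix = "sus2" ∨ suffix = "sus4") ∧ root ∈ pvRoots then 1 else 0

-- ===== PRECONDITION & SPEC =====
def Spec_isChordSus (ch : String) (out : Int) : Prop := out = isChordSus_alt ch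
instance (ch : String) (out : Int) : Decidable (Spec_isChordSus ch out) := by unfold Spec_isChordSus; infer_instance

-- ===== CLAIM (what is proved, stated in full; the proofs are below) =====
def Claim_equal_isChordSus : Prop := ∀ (ch : String), Dom_isChordSus ch → Spec_isChordSus ch (isChordSus ch)

-- ===== LEMMAS AND PROOFS =====

-- A's early-return loop is membership in the whitelist
theorem isChordSusGo_eq (ch : String) (l : List String) :
    isChordSusGo ch l = if ch ∈ l then 1 else 0 := by
  induction l with
  | nil => simp [isChordSusGo]
  | cons x xs ih =>
    by_cases h : ch = x
    · simp [isChordSusGo, h]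
    · simp [isChordSusGo, h, ih]

-- if B accepts ch, ch is literally root ++ suffix, hence in A's whitelist
theorem alt_accept_mem (ch : String)
    (hs : String.ofList (ch.toList.drop (ch.toList.length - 4)) = "sus2" ∨
          String.ofList (ch.toList.drop (ch.toList.length - 4)) = "sus4")
    (hr : String.ofList (ch.toList.take (ch.toList.length - 4)) ∈ pvRoots) :
    ch ∈ pvTemp := by
  have hch : ch = String.ofList (ch.toList.take (ch.toList.length - 4)) ++
      String.ofList (ch.toList.drop (ch.toList.length - 4)) := by
    rw [← String.ofList_append, List.take_append_drop, String.ofList_toList]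
  rw [hch]
  simp only [pvRoots, List.mem_cons, List.not_mem_nil, or_false] at hr
  rcases hs with hs | hs <;> rw [hs] <;>
    rcases hr with hr|hr|hr|hr|hr|hr|hr|hr|hr|hr|hr|hr <;> rw [hr] <;> decide

theorem main_eq (ch : String) : isChordSus ch = isChordSus_alt ch := by
  by_cases hm : ch ∈ pvTemp
  · fin_cases hm <;> decide
  · rw [isChordSus, isChordSusGo_eq, if_neg hm, isChordSus_alt]
    split
    · next h => exact absurd (alt_accept_mem ch h.1 h.2) hm
    · rfl

-- ===== VERDICT (by name: the statement is the Claim_ definition above) =====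
theorem isChordSus_spec : Claim_equal_isChordSus := by
  intro ch _
  unfold Spec_isChordSus
  exact main_eq ch
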